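-- pv_equiv track=rewrite | github.com/paw309/Hamiltonian-Knights | maze_path_exact_x.py | find_knight_path_exact_x
-- ===== SOURCE A (Python) =====
-- def is_valid(r, c, n):
--     return 0 <= r < n and 0 <= c < n
--
-- def knight_moves():
--     return [
--         (2, 1), (1, 2), (-1, 2), (-2, 1),
--         (-2, -1), (-1, -2), (1, -2), (2, -1)
--     ]
--
-- def find_knight_path_exact_x(n, start, end, x):
--     def backtrack(r, c, depth, path, visited):
--         if depth > x:
--             return None
--         if depth == x and (r, c) == end:
--             return path[:]
--         for dr, dc in knight_moves():
--             nr, nc = r + dr, c + dc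
--             if is_valid(nr, nc, n) and not visited[nr][nc]:
--                 visited[nr][nc] = True
--                 path.append((nr, nc))
--                 result = backtrack(nr, nc, depth + 1, path, visited)
--                 if result:
--                     return result
--                 path.pop()
--                 visited[nr][nc] = False
--         return None
--
--     visited = [[False for _ in range(n)] for _ in range(n)]
--     visited[start[0]][start[1]] = True
--     path = [start]
--     return backtrack(start[0], start[1], 0, path, visited)
-- ===== SOURCE B (Python) =====
-- def find_knight_path_exact_x(n, start, end, x):
--     MOVES = [
--         (2, 1), (1, 2), (-1, 2), (-2, 1),
--         (-2, -1), (-1, -2), (1, -2), (2, -1)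
--     ]
--     visited = [[False] * n for _ in range(n)]
--     path = []
--     # stack items: (r, c, depth) = a square to enter; (r, c) = an undo marker to leave it
--     stack = [(start[0], start[1], 0)]
--     while stack:
--         item = stack.pop()
--         if len(item) == 2:
--             r, c = item
--             visited[r][c] = False
--             path.pop()
--             continue
--         r, c, depth = item
--         visited[r][c] = True
--         path.append((r, c))
--         stack.append((r, c))
--         if depth == x and (r, c) == end:
--             return path[:]
--         if depth < x:
--             for dr, dc in reversed(MOVES):
--                 nr, nc = r + dr, c + dc
--                 if 0 <= nr < n and 0 <= nc < n and not visited[nr][nc]: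
--                     stack.append((nr, nc, depth + 1))
--     return None
-- ===== Notes on version B (the rewrite author's own statement) =====
-- stated objective: alternative
-- what changed: Replaces A's recursive backtracking (helper function recursing per move, undoing path/visited after each failed call) by an iterative DFS: an explicit stack of enter-square items and undo markers drives the search over the shared visited grid and path, successors pushed in reversed move order so the LIFO pop keeps the traversal order; Pre_ excludes only inputs where both raise IndexError (n <= 0 or a start coordinate outside Python's index range [-n, n)).
import Mathlib
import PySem

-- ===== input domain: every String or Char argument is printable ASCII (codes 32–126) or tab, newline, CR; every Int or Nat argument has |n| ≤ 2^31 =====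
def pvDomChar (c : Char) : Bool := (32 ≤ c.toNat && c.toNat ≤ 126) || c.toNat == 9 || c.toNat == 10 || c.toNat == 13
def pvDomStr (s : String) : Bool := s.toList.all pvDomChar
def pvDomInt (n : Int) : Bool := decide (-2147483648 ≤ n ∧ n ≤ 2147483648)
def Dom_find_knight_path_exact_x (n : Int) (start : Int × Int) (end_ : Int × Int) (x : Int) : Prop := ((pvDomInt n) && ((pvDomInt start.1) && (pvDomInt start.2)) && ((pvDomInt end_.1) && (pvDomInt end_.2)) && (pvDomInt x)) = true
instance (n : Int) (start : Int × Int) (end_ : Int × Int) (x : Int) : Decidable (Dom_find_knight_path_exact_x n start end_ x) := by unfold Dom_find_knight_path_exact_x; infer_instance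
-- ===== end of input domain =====

-- B replaces A's recursive backtracking by an iterative DFS: an explicit stack of enter-square items and
-- undo markers drives the search over the shared visited grid and path; objective: alternative.

-- ===== SHARED GRID PRIMITIVES (Python 2D-list reads/writes, used by both ports) =====

-- visited[r][c] read (Python indexing: pyGet? handles negative indices; the .getD defaults are unreachable
-- on the guarded in-range reads both programs perform).
def pvGridGet (vis : List (List Bool)) (r c : Int) : Bool :=
  (PySem.List.pyGet? ((PySem.List.pyGet? vis r).getD []) c).getD false

-- Python list assignment index: a negative index wraps by the list length (exact whenever Python does not
-- raise, i.e. for -len ≤ i < len; on Pre_ every assignment of A and B lies there).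
def pvWrapIdx (len : Nat) (i : Int) : Nat := (if i < 0 then i + len else i).toNat

-- visited[r][c] = b with Python's indexing.
def pvGridSetB (vis : List (List Bool)) (r c : Int) (b : Bool) : List (List Bool) :=
  vis.set (pvWrapIdx vis.length r)
    ((vis.getD (pvWrapIdx vis.length r) []).set (pvWrapIdx (vis.getD (pvWrapIdx vis.length r) []).length c) b)

-- ===== PORT A =====

def pvMoves : List (Int × Int) := [(2,1),(1,2),(-1,2),(-2,1),(-2,-1),(-1,-2),(1,-2),(2,-1)]

def pvIsValid (r c n : Int) : Bool := decide (0 ≤ r) && decide (r < n) && decide (0 ≤ c) && decide (c < n)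

-- visited[r][c] = True
def pvGridSet (vis : List (List Bool)) (r c : Int) : List (List Bool) := pvGridSetB vis r c true

mutual
def pvA_bt (n x : Int) (end_ : Int × Int) (fuel : Nat) (r c depth : Int)
    (path : List (Int × Int)) (vis : List (List Bool)) : Option (List (Int × Int)) :=
  if depth > x then none
  else match fuel with
    | 0 => none  -- termination guard only: fuel = (x+1-depth).toNat, which is > 0 whenever depth ≤ x
    | f + 1 =>
      if depth = x ∧ (r, c) = end_ then some path
      else pvA_loop n x end_ f r c depth path vis pvMoves
termination_by (fuel, 0, 0)
def pvA_loop (n x : Int) (end_ : Int × Int) (f : Nat) (r c depth : Int)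
    (path : List (Int × Int)) (vis : List (List Bool)) : List (Int × Int) → Option (List (Int × Int))
  | [] => none
  | (dr, dc) :: ms =>
    let nr := r + dr
    let nc := c + dc
    if pvIsValid nr nc n && !(pvGridGet vis nr nc) then
      -- Python mutates path/visited and undoes the mutation on failure, so each iteration starts from the
      -- same path/visited; the port passes the extended copies to the recursive call.
      match pvA_bt n x end_ f nr nc (depth + 1) (path ++ [(nr, nc)]) (pvGridSet vis nr nc) with
      | some res => if res.isEmpty then pvA_loop n x end_ f r c depth path vis ms else some res  -- `if result:`
      | none => pvA_loop n x end_ f r c depth path vis ms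
    else pvA_loop n x end_ f r c depth path vis ms
termination_by ms => (f, 1, ms.length)
end

def find_knight_path_exact_x (n : Int) (start : Int × Int) (end_ : Int × Int) (x : Int) : Option (List (Int × Int)) :=
  let visited0 := (PySem.List.pyRange 0 n 1).map (fun _ => (PySem.List.pyRange 0 n 1).map (fun _ => false))
  let visited := pvGridSet visited0 start.1 start.2
  let path := [start]
  pvA_bt n x end_ (x + 1).toNat start.1 start.2 0 path visited

-- ===== PORT B =====

-- stack items: `(r, c, depth)` = a square to enter, `(r, c)` = an undo marker to leave it
inductive PvItem where
  | node : Int → Int → Int → PvItem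
  | undo : Int → Int → PvItem
deriving Repr, DecidableEq

def pvMovesB : List (Int × Int) := [(2,1),(1,2),(-1,2),(-2,1),(-2,-1),(-1,-2),(1,-2),(2,-1)]

-- `for dr, dc in reversed(MOVES): ... stack.append((nr, nc, depth + 1))`; the stack's top is the list
-- head, so append = cons.
def pvB_push (n : Int) (r c depth : Int) (vis : List (List Bool)) (st : List PvItem) : List PvItem :=
  pvMovesB.reverse.foldl (fun st m =>
    let nr := r + m.1
    let nc := c + m.2
    if (decide (0 ≤ nr) && decide (nr < n) && decide (0 ≤ nc) && decide (nc < n))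
        && !(pvGridGet vis nr nc) then
      PvItem.node nr nc (depth + 1) :: st
    else st) st

-- weight lemmas cited by pvB_run's decreasing_by (the while loop terminates: each pop strictly shrinks pvStackW)
def pvPot (x d : Int) : Nat := 10 ^ (x + 1 - d).toNat
def pvW (x : Int) : PvItem → Nat
  | .node _ _ d => pvPot x d + 1
  | .undo _ _ => 1
def pvStackW (x : Int) (st : List PvItem) : Nat := (st.map (pvW x)).sum

lemma pvStackW_cons (x : Int) (it : PvItem) (st : List PvItem) :
    pvStackW x (it :: st) = pvW x it + pvStackW x st := by
  simp [pvStackW]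

lemma pvB_push_weight (n x r c depth : Int) (vis : List (List Bool))
    (st : List PvItem) (h : depth < x) :
    pvStackW x (pvB_push n r c depth vis st) < pvPot x depth + pvStackW x st := by
  have step : ∀ (L : List (Int × Int)) (st : List PvItem),
      pvStackW x (L.foldl (fun st m =>
        let nr := r + m.1
        let nc := c + m.2
        if (decide (0 ≤ nr) && decide (nr < n) && decide (0 ≤ nc) && decide (nc < n))
            && !(pvGridGet vis nr nc) then
          PvItem.node nr nc (depth + 1) :: st
        else st) st) ≤ pvStackW x st + L.length * (pvPot x (depth + 1) + 1) := by
    intro L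
    induction L with
    | nil => intro st; simp
    | cons m L ih =>
      intro st
      simp only [List.foldl_cons, List.length_cons]
      refine (ih _).trans ?_
      have hone : pvStackW x ((if (decide (0 ≤ r + m.1) && decide (r + m.1 < n) && decide (0 ≤ c + m.2) && decide (c + m.2 < n))
            && !(pvGridGet vis (r + m.1) (c + m.2)) then
          PvItem.node (r + m.1) (c + m.2) (depth + 1) :: st
        else st)) ≤ pvStackW x st + (pvPot x (depth + 1) + 1) := by
        split
        · simp [pvStackW_cons, pvW]; omega
        · omega
      refine le_trans (Nat.add_le_add_right hone _) ?_
      ring_nf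
      omega
  have h8 : pvMovesB.reverse.length = 8 := by decide
  have hp : pvPot x depth = 10 * pvPot x (depth + 1) := by
    unfold pvPot
    have : (x + 1 - depth).toNat = (x + 1 - (depth + 1)).toNat + 1 := by omega
    rw [this, pow_succ]; ring
  have hpos : 10 ≤ pvPot x (depth + 1) := by
    unfold pvPot
    calc 10 = 10 ^ 1 := by norm_num
      _ ≤ 10 ^ (x + 1 - (depth + 1)).toNat := Nat.pow_le_pow_right (by norm_num) (by omega)
  calc pvStackW x (pvB_push n r c depth vis st)
      ≤ pvStackW x st + 8 * (pvPot x (depth + 1) + 1) := by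
        have := step pvMovesB.reverse st
        rw [h8] at this
        exact this
    _ < pvPot x depth + pvStackW x st := by omega

-- the `while stack:` loop; state = (visited, path, stack)
def pvB_run (n x : Int) (end_ : Int × Int) (vis : List (List Bool)) (path : List (Int × Int))
    (st : List PvItem) : Option (List (Int × Int)) :=
  match st with
  | [] => none
  | PvItem.undo r c :: rest =>
    pvB_run n x end_ (pvGridSetB vis r c false) path.dropLast rest
  | PvItem.node r c depth :: rest =>
    let vis' := pvGridSetB vis r c true
    let path' := path ++ [(r, c)]
    -- the undo marker is pushed before the goal test; on `return path[:]` it is simply never popped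
    if depth = x ∧ (r, c) = end_ then some path'
    else if h : depth < x then
      pvB_run n x end_ vis' path' (pvB_push n r c depth vis' (PvItem.undo r c :: rest))
    else
      pvB_run n x end_ vis' path' (PvItem.undo r c :: rest)
termination_by pvStackW x st
decreasing_by
  · simp [pvStackW_cons, pvW]
  · have := pvB_push_weight n x r c depth (pvGridSetB vis r c true) (PvItem.undo r c :: rest) h
    rw [pvStackW_cons] at *
    simp only [pvW] at *
    omega
  · rw [pvStackW_cons, pvStackW_cons]
    simp only [pvW]
    have : 1 ≤ pvPot x depth := Nat.one_le_pow _ _ (by norm_num)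
    omega

def find_knight_path_exact_x_alt (n : Int) (start : Int × Int) (end_ : Int × Int) (x : Int) :
    Option (List (Int × Int)) :=
  let visited := (PySem.List.pyRange 0 n 1).map (fun _ => (PySem.List.pyRange 0 n 1).map (fun _ => false))
  pvB_run n x end_ visited [] [PvItem.node start.1 start.2 0]

-- ===== PRECONDITION & SPEC =====

-- Pre_ excludes exactly the inputs on which A (and B) raises IndexError: starts off Python's index range
-- [-n, n)² of the visited grid (in particular every start when n ≤ 0).
def Pre_find_knight_path_exact_x (n : Int) (start : Int × Int) (end_ : Int × Int) (x : Int) : Prop :=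
  -n ≤ start.1 ∧ start.1 < n ∧ -n ≤ start.2 ∧ start.2 < n

instance (n : Int) (start : Int × Int) (end_ : Int × Int) (x : Int) :
    Decidable (Pre_find_knight_path_exact_x n start end_ x) := by
  unfold Pre_find_knight_path_exact_x; infer_instance

def pvWitness_find_knight_path_exact_x : Int × (Int × Int) × (Int × Int) × Int := (4, (0, 0), (2, 1), 1)

def Spec_find_knight_path_exact_x (n : Int) (start : Int × Int) (end_ : Int × Int) (x : Int) (out : Option (List (Int × Int))) : Prop := out = find_knight_path_exact_x_alt n start end_ x
instance (n : Int) (start : Int × Int) (end_ : Int × Int) (x : Int) (out : Option (List (Int × Int))) : Decidable (Spec_find_knight_path_exact_x n start end_ x out) := by unfold Spec_find_knight_path_exact_x; infer_instance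

-- ===== CLAIM (what is proved, stated in full; the proofs are below) =====
def Claim_equal_find_knight_path_exact_x : Prop := ∀ (n : Int) (start : Int × Int) (end_ : Int × Int) (x : Int), Dom_find_knight_path_exact_x n start end_ x → Pre_find_knight_path_exact_x n start end_ x → Spec_find_knight_path_exact_x n start end_ x (find_knight_path_exact_x n start end_ x)


-- ===== LEMMAS AND PROOFS =====

lemma pvSet_self {α : Type} (l : List α) (i : Nat) (a : α) (h : l[i]? = some a) :
    l.set i a = l := by
  apply List.ext_getElem?
  intro j
  rw [List.getElem?_set]
  by_cases hij : i = j
  · subst hij; simp [← h]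
  · simp [hij]

lemma pvWrapIdx_nonneg (len : Nat) (i : Int) (h : 0 ≤ i) : pvWrapIdx len i = i.toNat := by
  unfold pvWrapIdx; rw [if_neg (by omega)]

lemma pvGridGet_nonneg (vis : List (List Bool)) (i j : Int) (hi : 0 ≤ i) (hj : 0 ≤ j) :
    pvGridGet vis i j = (((vis[i.toNat]?).getD [])[j.toNat]?).getD false := by
  unfold pvGridGet
  rw [PySem.List.pyGet?_of_nonneg vis hi, PySem.List.pyGet?_of_nonneg _ hj]

-- marking a square that is currently unvisited and then unmarking it restores the grid
lemma pvSetUnset (vis : List (List Bool)) (r c : Int) (hr : 0 ≤ r) (hc : 0 ≤ c)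
    (hget : pvGridGet vis r c = false) :
    pvGridSetB (pvGridSetB vis r c true) r c false = vis := by
  rw [pvGridGet_nonneg vis r c hr hc] at hget
  by_cases hrlt : r.toNat < vis.length
  · set row := vis[r.toNat] with hrow
    have e1 : pvGridSetB vis r c true = vis.set r.toNat (row.set c.toNat true) := by
      unfold pvGridSetB
      rw [pvWrapIdx_nonneg _ _ hr, List.getD_eq_getElem vis [] hrlt, pvWrapIdx_nonneg _ _ hc]
    have e2 : pvGridSetB (vis.set r.toNat (row.set c.toNat true)) r c false
        = (vis.set r.toNat (row.set c.toNat true)).set r.toNat ((row.set c.toNat true).set c.toNat false) := by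
      unfold pvGridSetB
      rw [pvWrapIdx_nonneg _ _ hr,
        List.getD_eq_getElem _ [] (by simpa using hrlt)]
      simp only [List.length_set, List.getElem_set_self, pvWrapIdx_nonneg _ _ hc]
    have hvisself : vis[r.toNat]? = some row := by rw [List.getElem?_eq_getElem hrlt]
    rw [e1, e2, List.set_set, List.set_set]
    by_cases hclt : c.toNat < row.length
    · have hval : row[c.toNat] = false := by
        rw [List.getElem?_eq_getElem hrlt] at hget
        simp only [Option.getD_some] at hget
        rw [List.getElem?_eq_getElem hclt] at hget
        simpa using hget
      have hcell : row[c.toNat]? = some false := by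
        rw [List.getElem?_eq_getElem hclt, hval]
      rw [pvSet_self row c.toNat false hcell, pvSet_self vis r.toNat row hvisself]
    · rw [List.set_eq_of_length_le (l := row) (by omega), pvSet_self vis r.toNat row hvisself]
  · have hid : ∀ b, pvGridSetB vis r c b = vis := by
      intro b
      unfold pvGridSetB
      rw [pvWrapIdx_nonneg _ _ hr]
      exact List.set_eq_of_length_le (by omega)
    rw [hid, hid]

-- Python's wrapped assignment index equals the assignment at the wrapped nonnegative coordinates
def PvShape (n : Int) (vis : List (List Bool)) : Prop :=
  vis.length = n.toNat ∧ ∀ row ∈ vis, row.length = n.toNat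

lemma pvGridSetB_wrap (n : Int) (vis : List (List Bool)) (r c : Int) (b : Bool) (hsh : PvShape n vis)
    (hn : 0 < n) (hr1 : -n ≤ r) (hr2 : r < n) (hc1 : -n ≤ c) (hc2 : c < n) :
    pvGridSetB vis r c b = pvGridSetB vis (if r < 0 then r + n else r) (if c < 0 then c + n else c) b := by
  have hwr : pvWrapIdx vis.length (if r < 0 then r + n else r) = pvWrapIdx vis.length r := by
    unfold pvWrapIdx
    rw [hsh.1]
    split_ifs <;> omega
  have hlt : pvWrapIdx vis.length r < vis.length := by
    unfold pvWrapIdx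
    rw [hsh.1]
    split_ifs <;> omega
  have hrowlen : (vis.getD (pvWrapIdx vis.length r) []).length = n.toNat := by
    rw [List.getD_eq_getElem vis [] hlt]
    exact hsh.2 _ (List.getElem_mem _)
  have hwc : pvWrapIdx (vis.getD (pvWrapIdx vis.length r) []).length (if c < 0 then c + n else c)
      = pvWrapIdx (vis.getD (pvWrapIdx vis.length r) []).length c := by
    rw [hrowlen]
    unfold pvWrapIdx
    split_ifs <;> omega
  unfold pvGridSetB
  rw [hwr, hwc]

def pvGrid0 (n : Int) : List (List Bool) :=
  (PySem.List.pyRange 0 n 1).map (fun _ => (PySem.List.pyRange 0 n 1).map (fun _ => false))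

lemma pvShape_grid0 (n : Int) : PvShape n (pvGrid0 n) := by
  constructor
  · simp [pvGrid0, PySem.List.length_pyRange_one]
  · intro row hmem
    simp only [pvGrid0, List.mem_map] at hmem
    obtain ⟨_, _, h⟩ := hmem
    rw [← h]
    simp [PySem.List.length_pyRange_one]

lemma pvGrid0_false (n : Int) (i j : Int) (hi0 : 0 ≤ i) (hin : i < n) (hj0 : 0 ≤ j) (hjn : j < n) :
    pvGridGet (pvGrid0 n) i j = false := by
  have h1 : i.toNat < (pvGrid0 n).length := by
    have := (pvShape_grid0 n).1
    omega
  rw [pvGridGet_nonneg _ _ _ hi0 hj0, List.getElem?_eq_getElem h1]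
  have hrow : (pvGrid0 n)[i.toNat] = (PySem.List.pyRange 0 n 1).map (fun _ => false) := by
    simp [pvGrid0]
  rw [hrow]
  simp only [Option.getD_some]
  have h2 : j.toNat < ((PySem.List.pyRange 0 n 1).map (fun _ => (false : Bool))).length := by
    simp [PySem.List.length_pyRange_one]; omega
  rw [List.getElem?_eq_getElem h2]
  simp

lemma pvA_loop_none (n x : Int) (end_ : Int × Int) (f : Nat) (r c depth : Int)
    (path : List (Int × Int)) (vis : List (List Bool)) (h : x < depth + 1) :
    ∀ ms, pvA_loop n x end_ f r c depth path vis ms = none := by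
  intro ms
  induction ms with
  | nil => simp [pvA_loop]
  | cons m ms ih =>
    obtain ⟨dr, dc⟩ := m
    rw [pvA_loop]
    have hbt : pvA_bt n x end_ f (r + dr) (c + dc) (depth + 1) (path ++ [(r + dr, c + dc)])
        (pvGridSet vis (r + dr) (c + dc)) = none := by
      rw [pvA_bt.eq_def]
      simp [h]
    simp only [hbt, ih]
    split <;> rfl

lemma pvA_loop_ne (n x : Int) (end_ : Int × Int) (f : Nat) (r c depth : Int) :
    ∀ ms (path : List (Int × Int)) vis res,
      pvA_loop n x end_ f r c depth path vis ms = some res → res ≠ [] := by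
  intro ms
  induction ms with
  | nil => intro path vis res h; rw [pvA_loop] at h; exact absurd h (by simp)
  | cons m ms ihm =>
    intro path vis res h
    obtain ⟨dr, dc⟩ := m
    rw [pvA_loop] at h
    split at h
    · cases heq : pvA_bt n x end_ f (r + dr) (c + dc) (depth + 1)
          (path ++ [(r + dr, c + dc)]) (pvGridSet vis (r + dr) (c + dc)) with
      | none => rw [heq] at h; exact ihm _ _ _ h
      | some res' =>
        rw [heq] at h
        dsimp only at h
        by_cases he : res'.isEmpty
        · rw [if_pos he] at h; exact ihm _ _ _ h
        · rw [if_neg he] at h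
          simp only [Option.some.injEq] at h
          subst h
          simpa using he
    · exact ihm _ _ _ h

lemma pvA_bt_ne (n x : Int) (end_ : Int × Int) (fuel : Nat) (r c depth : Int)
    (path : List (Int × Int)) (vis : List (List Bool)) (res : List (Int × Int))
    (hpath : path ≠ []) (h : pvA_bt n x end_ fuel r c depth path vis = some res) : res ≠ [] := by
  rw [pvA_bt.eq_def] at h
  split at h
  · exact absurd h (by simp)
  · match fuel, h with
    | 0, h => exact absurd h (by simp)
    | f + 1, h =>
      dsimp only at h
      by_cases hhit : depth = x ∧ (r, c) = end_
      · rw [if_pos hhit] at h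
        simp only [Option.some.injEq] at h; subst h; exact hpath
      · rw [if_neg hhit] at h
        exact pvA_loop_ne n x end_ f r c depth pvMoves path vis res h

def pvMkB (n r c depth : Int) (vis : List (List Bool)) (m : Int × Int) : Option PvItem :=
  if (decide (0 ≤ r + m.1) && decide (r + m.1 < n) && decide (0 ≤ c + m.2) && decide (c + m.2 < n))
      && !(pvGridGet vis (r + m.1) (c + m.2)) then
    some (PvItem.node (r + m.1) (c + m.2) (depth + 1))
  else none

lemma pvB_push_eq (n r c depth : Int) (vis : List (List Bool)) (st : List PvItem) :
    pvB_push n r c depth vis st = pvMovesB.filterMap (pvMkB n r c depth vis) ++ st := by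
  unfold pvB_push
  generalize pvMovesB = L
  induction L generalizing st with
  | nil => simp
  | cons m L ihL =>
    rw [List.reverse_cons, List.foldl_append, ihL]
    simp only [List.foldl_cons, List.foldl_nil, List.filterMap_cons, pvMkB]
    split
    · simp
    · rfl

lemma pvML (n x : Int) (end_ : Int × Int) :
    ∀ k : Nat, ∀ d : Int, (x + 1 - d).toNat = k →
      ∀ (r c : Int) (vis : List (List Bool)) (path : List (Int × Int)) (rest : List PvItem),
        pvGridSetB (pvGridSetB vis r c true) r c false = vis →
        pvB_run n x end_ vis path (PvItem.node r c d :: rest) =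
          (pvA_bt n x end_ k r c d (path ++ [(r, c)]) (pvGridSetB vis r c true)).or
            (pvB_run n x end_ vis path rest) := by
  intro k
  induction k using Nat.strong_induction_on with
  | _ k IHk =>
  intro d hk r c vis path rest hundo
  rw [pvB_run]
  by_cases hdx : d > x
  · have hk0 : k = 0 := by omega
    subst hk0
    rw [pvA_bt.eq_def]
    simp only [hdx, if_true]
    have h1 : ¬ (d = x ∧ (r, c) = end_) := by
      intro ⟨h, _⟩; omega
    have h2 : ¬ (d < x) := by omega
    simp only [h1, if_false, dif_neg h2]
    rw [pvB_run, hundo, List.dropLast_concat]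
    simp
  · obtain ⟨k', hk'⟩ : ∃ k', k = k' + 1 := ⟨k - 1, by omega⟩
    subst hk'
    rw [pvA_bt.eq_def]
    simp only [hdx, if_false]
    by_cases hhit : d = x ∧ (r, c) = end_
    · simp [hhit]
    · simp only [hhit, if_false]
      by_cases hdlt : d < x
      · -- children are generated
        simp only [dif_pos hdlt]
        rw [pvB_push_eq]
        have main : ∀ ms : List (Int × Int),
            pvB_run n x end_ (pvGridSetB vis r c true) (path ++ [(r, c)])
                (ms.filterMap (pvMkB n r c d (pvGridSetB vis r c true)) ++ PvItem.undo r c :: rest) =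
              (pvA_loop n x end_ k' r c d (path ++ [(r, c)]) (pvGridSetB vis r c true) ms).or
                (pvB_run n x end_ (pvGridSetB vis r c true) (path ++ [(r, c)])
                  (PvItem.undo r c :: rest)) := by
          intro ms
          induction ms with
          | nil => rw [pvA_loop]; simp
          | cons m ms ihm =>
            obtain ⟨dr, dc⟩ := m
            rw [pvA_loop]
            have hcondeq : (pvIsValid (r + dr) (c + dc) n
                && !pvGridGet (pvGridSetB vis r c true) (r + dr) (c + dc))
                = ((decide (0 ≤ r + dr) && decide (r + dr < n) && decide (0 ≤ c + dc) && decide (c + dc < n))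
                    && !(pvGridGet (pvGridSetB vis r c true) (r + dr) (c + dc))) := rfl
            by_cases hcond : ((decide (0 ≤ r + dr) && decide (r + dr < n) && decide (0 ≤ c + dc) && decide (c + dc < n))
                && !(pvGridGet (pvGridSetB vis r c true) (r + dr) (c + dc))) = true
            · -- move admissible: a frame is pushed / A recurses
              have hmk : pvMkB n r c d (pvGridSetB vis r c true) (dr, dc) =
                  some (PvItem.node (r + dr) (c + dc) (d + 1)) := by
                unfold pvMkB
                rw [if_pos hcond]
              rw [List.filterMap_cons, hmk]
              simp only [List.cons_append]
              have hbits := hcond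
              simp only [Bool.and_eq_true, Bool.not_eq_true', decide_eq_true_eq] at hbits
              have hundo' : pvGridSetB (pvGridSetB (pvGridSetB vis r c true) (r + dr) (c + dc) true)
                  (r + dr) (c + dc) false = pvGridSetB vis r c true :=
                pvSetUnset _ _ _ hbits.1.1.1.1 hbits.1.1.2 hbits.2
              rw [IHk k' (by omega) (d + 1) (by omega) (r + dr) (c + dc)
                (pvGridSetB vis r c true) (path ++ [(r, c)])
                (ms.filterMap (pvMkB n r c d (pvGridSetB vis r c true)) ++ PvItem.undo r c :: rest)
                hundo']
              rw [ihm]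
              rw [hcondeq, if_pos hcond]
              have hset : pvGridSet (pvGridSetB vis r c true) (r + dr) (c + dc)
                  = pvGridSetB (pvGridSetB vis r c true) (r + dr) (c + dc) true := rfl
              rw [hset]
              cases heq : pvA_bt n x end_ k' (r + dr) (c + dc) (d + 1)
                  ((path ++ [(r, c)]) ++ [(r + dr, c + dc)])
                  (pvGridSetB (pvGridSetB vis r c true) (r + dr) (c + dc) true) with
              | none => simp
              | some res' =>
                have hne : res' ≠ [] :=
                  pvA_bt_ne n x end_ k' (r + dr) (c + dc) (d + 1) _ _ res' (by simp) heq
                have he : res'.isEmpty = false := by simpa using hne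
                dsimp only
                rw [he]
                simp
            · -- move rejected on both sides
              have hmk : pvMkB n r c d (pvGridSetB vis r c true) (dr, dc) = none := by
                unfold pvMkB
                rw [if_neg (by simpa using hcond)]
              rw [List.filterMap_cons, hmk, ihm]
              rw [hcondeq, if_neg (by simpa using hcond)]
        rw [show pvMovesB = pvMoves from rfl, main pvMoves]
        rw [pvB_run, hundo, List.dropLast_concat]
      · -- d = x but not the end square: A's loop dies at depth x+1, B pushes only the undo marker
        simp only [dif_neg hdlt]
        rw [pvA_loop_none n x end_ k' r c d (path ++ [(r, c)]) (pvGridSetB vis r c true) (by omega) pvMoves]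
        rw [pvB_run, hundo, List.dropLast_concat]
        simp

theorem find_knight_path_exact_x_spec : Claim_equal_find_knight_path_exact_x := by
  intro n start end_ x hdom hpre
  obtain ⟨g1, g2, g3, g4⟩ := hpre
  have hn : 0 < n := by omega
  unfold Spec_find_knight_path_exact_x find_knight_path_exact_x find_knight_path_exact_x_alt
  have hgrid : (PySem.List.pyRange 0 n 1).map (fun _ => (PySem.List.pyRange 0 n 1).map (fun _ => false)) = pvGrid0 n := rfl
  rw [hgrid]
  -- the initial mark of the start square is undone exactly by the root's undo marker
  have hundo : pvGridSetB (pvGridSetB (pvGrid0 n) start.1 start.2 true) start.1 start.2 false = pvGrid0 n := by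
    have hw1 := pvGridSetB_wrap n (pvGrid0 n) start.1 start.2 true (pvShape_grid0 n) hn g1 g2 g3 g4
    have hsh' : PvShape n (pvGridSetB (pvGrid0 n) start.1 start.2 true) := by
      rw [hw1]
      constructor
      · unfold pvGridSetB
        rw [List.length_set]
        exact (pvShape_grid0 n).1
      · intro row hmem
        unfold pvGridSetB at hmem
        rcases List.mem_or_eq_of_mem_set hmem with h | h
        · exact (pvShape_grid0 n).2 _ h
        · subst h
          rw [List.length_set]
          have hlt : pvWrapIdx (pvGrid0 n).length (if start.1 < 0 then start.1 + n else start.1) < (pvGrid0 n).length := by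
            unfold pvWrapIdx
            rw [(pvShape_grid0 n).1]
            split_ifs <;> omega
          rw [List.getD_eq_getElem _ [] hlt]
          exact (pvShape_grid0 n).2 _ (List.getElem_mem _)
    have hw2 := pvGridSetB_wrap n (pvGridSetB (pvGrid0 n) start.1 start.2 true) start.1 start.2 false hsh' hn g1 g2 g3 g4
    rw [hw2, hw1]
    apply pvSetUnset
    · split_ifs <;> omega
    · split_ifs <;> omega
    · exact pvGrid0_false n _ _ (by split_ifs <;> omega) (by split_ifs <;> omega)
        (by split_ifs <;> omega) (by split_ifs <;> omega)
  have hML := pvML n x end_ ((x + 1 - 0).toNat) 0 rfl start.1 start.2 (pvGrid0 n) [] [] hundo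
  rw [hML]
  rw [pvB_run]
  have hfuel : (x + 1 - 0).toNat = (x + 1).toNat := by omega
  rw [hfuel] at *
  have hpathe : ([] : List (Int × Int)) ++ [(start.1, start.2)] = [start] := by simp
  rw [hpathe] at *
  have hseed : pvGridSetB (pvGrid0 n) start.1 start.2 true = pvGridSet (pvGrid0 n) start.1 start.2 := rfl
  rw [hseed] at *
  cases pvA_bt n x end_ (x + 1).toNat start.1 start.2 0 [start] (pvGridSet (pvGrid0 n) start.1 start.2) <;> simp
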